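-- pv_equiv track=rewrite | github.com/junbaiw/bpb3 | bpb3/script/script_high/other/common.py | uniq_and_duplicates
-- ===== SOURCE A (Python) =====
-- def uniq_and_duplicates(a):
--     seen = set()
--     dups = set()
--     for x in a:
--         if x not in seen:
--             seen.add(x)
--         else:
--             dups.add(x)
--
--     return seen, dups
-- ===== SOURCE B (Python) =====
-- def uniq_and_duplicates(a):
--     dups = {x for i, x in enumerate(a) if x in a[:i]}
--     return set(a), dups
-- ===== Notes on version B (the rewrite author's own statement) =====
-- stated objective: simpler
-- what changed: Replaces the stateful single pass that grows two sets with branching by a declarative decomposition: seen is just set(a) and dups is a comprehension selecting elements that already occur in the prefix a[:i].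
import Mathlib
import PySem

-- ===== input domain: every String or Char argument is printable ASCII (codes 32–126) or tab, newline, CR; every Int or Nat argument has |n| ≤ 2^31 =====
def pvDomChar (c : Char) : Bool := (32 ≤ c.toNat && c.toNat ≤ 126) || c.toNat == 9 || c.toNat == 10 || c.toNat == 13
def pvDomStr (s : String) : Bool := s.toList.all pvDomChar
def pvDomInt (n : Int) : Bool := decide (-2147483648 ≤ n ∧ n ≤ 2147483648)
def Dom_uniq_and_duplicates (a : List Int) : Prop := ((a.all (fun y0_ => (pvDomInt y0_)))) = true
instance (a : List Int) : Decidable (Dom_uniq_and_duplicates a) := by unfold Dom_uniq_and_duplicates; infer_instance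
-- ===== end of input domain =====

-- ===== PORT A =====
-- B changes: declarative two-comprehension decomposition instead of A's stateful two-set pass (objective: simpler).
def uniq_and_duplicates (a : List Int) : List Int × List Int :=
  (a.foldl (fun sd x =>
      if ¬ PySem.Set.contains sd.1 x then (PySem.Set.add sd.1 x, sd.2)
      else (sd.1, PySem.Set.add sd.2 x))
    (PySem.Set.empty, PySem.Set.empty))

-- ===== PORT B =====
def uniq_and_duplicates_alt (a : List Int) : List Int × List Int :=
  let dups := PySem.Set.ofList
    (((PySem.List.enumerate a 0).filter
        (fun p => decide (p.2 ∈ PySem.List.slice a none (some p.1)))).map (·.2))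
  (PySem.Set.ofList a, dups)

-- ===== PRECONDITION & SPEC =====
def Spec_uniq_and_duplicates (a : List Int) (out : List Int × List Int) : Prop := out = uniq_and_duplicates_alt a
instance (a : List Int) (out : List Int × List Int) : Decidable (Spec_uniq_and_duplicates a out) := by unfold Spec_uniq_and_duplicates; infer_instance

-- ===== CLAIM (what is proved, stated in full; the proofs are below) =====
def Claim_equal_uniq_and_duplicates : Prop := ∀ (a : List Int), Dom_uniq_and_duplicates a → Spec_uniq_and_duplicates a (uniq_and_duplicates a)

-- ===== LEMMAS AND PROOFS =====

-- B's dup-selection list for a list l: elements that occur earlier in l.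
def dupEv (l : List Int) : List Int :=
  ((PySem.List.enumerate l 0).filter
      (fun p => decide (p.2 ∈ PySem.List.slice l none (some p.1)))).map (·.2)

lemma dupEv_append (a : List Int) (x : Int) :
    dupEv (a ++ [x]) = dupEv a ++ (if x ∈ a then [x] else []) := by
  unfold dupEv
  rw [PySem.List.enumerate_append, List.filter_append, List.map_append]
  congr 1
  · apply congrArg
    apply List.filter_congr
    intro p hp
    rcases (PySem.List.mem_enumerate_iff a 0 p).1 hp with ⟨k, hk, rfl⟩
    simp only [Int.zero_add]
    rw [PySem.List.slice_to_natCast, PySem.List.slice_to_natCast,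
        List.take_append_of_le_length (Nat.le_of_lt hk)]
  · simp only [PySem.List.enumerate_cons, PySem.List.enumerate_nil]
    rw [List.filter_cons]
    have hsl : PySem.List.slice (a ++ [x]) none (some ((0 : Int) + a.length)) = a := by
      have : ((0 : Int) + (a.length : Int)) = ((a.length : Nat) : Int) := by ring
      rw [this, PySem.List.slice_to_natCast, List.take_left]
    rw [hsl]
    by_cases hx : x ∈ a <;> simp [hx]

lemma foldl_char (a : List Int) :
    a.foldl (fun sd x =>
        if ¬ PySem.Set.contains sd.1 x then (PySem.Set.add sd.1 x, sd.2)
        else (sd.1, PySem.Set.add sd.2 x))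
      (PySem.Set.empty, PySem.Set.empty)
    = (PySem.Set.ofList a, PySem.Set.ofList (dupEv a)) := by
  induction a using List.reverseRecOn with
  | nil => rfl
  | append_singleton a x ih =>
      rw [List.foldl_append, ih, dupEv_append,
          PySem.Set.ofList_append_singleton]
      simp only [List.foldl_cons, List.foldl_nil]
      by_cases hx : x ∈ a
      · rw [PySem.Set.add_of_mem ((PySem.Set.mem_ofList a x).2 hx)]
        simp [hx, PySem.Set.ofList_append_singleton]
      · simp [hx]

-- ===== VERDICT (by name: the statement is the Claim_ definition above) =====
theorem uniq_and_duplicates_spec : Claim_equal_uniq_and_duplicates := by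
  intro a _
  unfold Spec_uniq_and_duplicates uniq_and_duplicates uniq_and_duplicates_alt
  rw [foldl_char]
  rfl
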